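-- pv_equiv track=rewrite | github.com/anupamahazarika99/DNA | module1.py | geneInfo
-- ===== SOURCE A (Python) =====
-- def geneInfo(gene):
--     count = 0
--     geneNo = ''
--     geneNa = ''
--     for x in gene:
--         if count == 0 and x != '|':
--             continue
--         elif count == 0 and x == '|':
--             count = 1
--         elif count == 1 and x != '|':
--             geneNo = geneNo + x
--         elif count == 1 and x == '|':
--             count = 2
--         elif count == 2 and x != '|':
--             geneNa = geneNa + x
--     return (geneNo, geneNa)
-- ===== SOURCE B (Python) =====
-- def geneInfo(gene):
--     parts = gene.split('|')
--     geneNo = parts[1] if len(parts) > 1 else ''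
--     geneNa = ''.join(parts[2:])
--     return (geneNo, geneNa)
-- ===== Notes on version B (the rewrite author's own statement) =====
-- stated objective: simpler
-- what changed: Replaced the five-branch per-character state machine with one split on the delimiter, indexing the second part for the gene number and empty-string-joining the remaining parts for the name (which reproduces dropping every later delimiter).
import Mathlib
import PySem

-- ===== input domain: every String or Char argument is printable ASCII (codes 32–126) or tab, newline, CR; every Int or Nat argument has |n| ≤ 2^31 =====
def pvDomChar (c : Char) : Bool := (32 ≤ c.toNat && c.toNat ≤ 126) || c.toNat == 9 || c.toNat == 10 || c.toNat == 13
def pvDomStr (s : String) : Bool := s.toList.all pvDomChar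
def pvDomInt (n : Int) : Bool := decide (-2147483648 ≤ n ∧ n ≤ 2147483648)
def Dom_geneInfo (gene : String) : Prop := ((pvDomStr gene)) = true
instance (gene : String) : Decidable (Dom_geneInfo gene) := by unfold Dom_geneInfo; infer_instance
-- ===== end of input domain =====

-- B replaces A's five-branch character state machine by one split('|') plus
-- indexing and an empty-string join (objective: simpler). Same O(n) cost.

-- ===== PORT A =====
-- one step of A's loop body: the if/elif chain over (count, geneNo, geneNa)
def geneStep (st : Int × List Char × List Char) (x : Char) : Int × List Char × List Char :=
  let count := st.1
  let geneNo := st.2.1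
  let geneNa := st.2.2
  if count = 0 ∧ x ≠ '|' then st
  else if count = 0 ∧ x = '|' then (1, geneNo, geneNa)
  else if count = 1 ∧ x ≠ '|' then (count, geneNo ++ [x], geneNa)
  else if count = 1 ∧ x = '|' then (2, geneNo, geneNa)
  else if count = 2 ∧ x ≠ '|' then (count, geneNo, geneNa ++ [x])
  else st

def geneInfo (gene : String) : String × String :=
  let st := gene.toList.foldl geneStep (0, [], [])
  (String.ofList st.2.1, String.ofList st.2.2)

-- ===== PORT B =====
def geneInfo_alt (gene : String) : String × String :=
  let parts := PySem.Chars.splitOn gene.toList ['|']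
  let geneNo := if 1 < parts.length then parts.getD 1 [] else []
  let geneNa := PySem.Chars.join [] (parts.drop 2)
  (String.ofList geneNo, String.ofList geneNa)

-- ===== PRECONDITION & SPEC =====
def Spec_geneInfo (gene : String) (out : String × String) : Prop := out = geneInfo_alt gene
instance (gene : String) (out : String × String) : Decidable (Spec_geneInfo gene out) := by unfold Spec_geneInfo; infer_instance

-- ===== CLAIM (what is proved, stated in full; the proofs are below) =====
def Claim_equal_geneInfo : Prop := ∀ (gene : String), Dom_geneInfo gene → Spec_geneInfo gene (geneInfo gene)

-- ===== LEMMAS AND PROOFS =====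

-- split a char list at '|' characters: (first piece, remaining pieces)
def splitP : List Char → List Char × List (List Char)
  | [] => ([], [])
  | c :: rest =>
    if c = '|' then ([], (splitP rest).1 :: (splitP rest).2)
    else (c :: (splitP rest).1, (splitP rest).2)

theorem go_eq_splitP (l : List Char) : ∀ (fuel : Nat) (cur : List Char) (acc : List (List Char)),
    l.length ≤ fuel →
    PySem.Chars.splitOn.go ['|'] fuel l cur acc
      = acc.reverse ++ (cur.reverse ++ (splitP l).1) :: (splitP l).2 := by
  induction l with
  | nil =>
    intro fuel cur acc _
    cases fuel <;> simp [PySem.Chars.splitOn.go, splitP]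
  | cons c rest ih =>
    intro fuel cur acc hf
    cases fuel with
    | zero => simp at hf
    | succ f =>
      by_cases hc : c = '|'
      · subst hc
        rw [show PySem.Chars.splitOn.go ['|'] (f+1) ('|' :: rest) cur acc
              = PySem.Chars.splitOn.go ['|'] f rest [] (cur.reverse :: acc) by
            simp [PySem.Chars.splitOn.go, List.isPrefixOf]]
        rw [ih f [] (cur.reverse :: acc) (by simpa using hf)]
        simp [splitP]
      · rw [show PySem.Chars.splitOn.go ['|'] (f+1) (c :: rest) cur acc
              = PySem.Chars.splitOn.go ['|'] f rest (c :: cur) acc by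
            simp only [PySem.Chars.splitOn.go, List.isPrefixOf]
            rw [if_neg (by simp [Ne.symm hc])]]
        rw [ih f (c :: cur) acc (by simpa using Nat.lt_succ_iff.mp (by simpa using hf))]
        simp [splitP, hc]

theorem splitOn_eq_splitP (l : List Char) :
    PySem.Chars.splitOn l ['|'] = (splitP l).1 :: (splitP l).2 := by
  unfold PySem.Chars.splitOn
  rw [go_eq_splitP l (l.length + 1) [] [] (Nat.le_succ _)]
  simp

theorem foldl_state2 (l : List Char) : ∀ (no na : List Char),
    l.foldl geneStep (2, no, na) = (2, no, na ++ (splitP l).1 ++ (splitP l).2.flatten) := by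
  induction l with
  | nil => intro no na; simp [splitP]
  | cons c rest ih =>
    intro no na
    by_cases hc : c = '|'
    · subst hc
      simp only [List.foldl_cons, geneStep]
      norm_num
      rw [ih]
      simp [splitP]
    · simp only [List.foldl_cons, geneStep]
      simp only [hc, and_true, and_false, if_false, if_true, ne_eq, not_false_eq_true]
      norm_num
      rw [ih]
      simp [splitP, hc]

theorem foldl_state1 (l : List Char) : ∀ (no na : List Char),
    l.foldl geneStep (1, no, na)
      = ((if (splitP l).2 = [] then 1 else 2), no ++ (splitP l).1, na ++ (splitP l).2.flatten) := by
  induction l with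
  | nil => intro no na; simp [splitP]
  | cons c rest ih =>
    intro no na
    by_cases hc : c = '|'
    · subst hc
      simp only [List.foldl_cons, geneStep]
      norm_num
      rw [foldl_state2]
      simp [splitP]
    · simp only [List.foldl_cons, geneStep]
      simp only [hc, and_true, and_false, if_false, if_true, ne_eq, not_false_eq_true]
      norm_num
      rw [ih]
      simp [splitP, hc]

theorem foldl_state0 (l : List Char) :
    l.foldl geneStep (0, [], [])
      = match (splitP l).2 with
        | [] => (0, [], [])
        | h :: t => ((if t = [] then 1 else 2), h, t.flatten) := by
  induction l with
  | nil => simp [splitP]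
  | cons c rest ih =>
    by_cases hc : c = '|'
    · subst hc
      simp only [List.foldl_cons, geneStep]
      norm_num
      rw [foldl_state1]
      simp [splitP]
    · simp only [List.foldl_cons, geneStep]
      simp only [hc, and_true, and_false, if_false, if_true, ne_eq, not_false_eq_true]
      rw [ih]
      simp [splitP, hc]

theorem intercalate_nil (ps : List (List Char)) : ([] : List Char).intercalate ps = ps.flatten := by
  induction ps with
  | nil => simp [List.intercalate]
  | cons h t ih =>
    cases t with
    | nil => simp [List.intercalate]
    | cons h2 t2 =>
      simp [List.intercalate, List.intersperse] at *
      simpa using ih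

-- ===== VERDICT (by name: the statement is the Claim_ definition above) =====
theorem geneInfo_spec : Claim_equal_geneInfo := by
  intro gene _
  unfold Spec_geneInfo geneInfo geneInfo_alt
  rw [splitOn_eq_splitP, foldl_state0]
  cases h2 : (splitP gene.toList).2 with
  | nil => simp [PySem.Chars.join, intercalate_nil]
  | cons h t =>
    cases t with
    | nil => simp [PySem.Chars.join, intercalate_nil]
    | cons h2 t2 => simp [PySem.Chars.join, intercalate_nil]
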